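-- pv_equiv track=rewrite | github.com/munaibaraisa/compilerF | leftmost derivition.py | leftmost_derivation
-- ===== SOURCE A (Python) =====
-- grammar = {
--     "S": ["SS+", "SS*", "a"]
-- }
--
-- def leftmost_derivation(symbols, target, derivation):
--     """
--     Recursive function to generate leftmost derivation.
--     symbols: current list of symbols (terminals + non-terminals)
--     target: target string to derive
--     derivation: list of derivation steps so far
--     """
--     current = "".join(symbols)
--
--     # If current string matches target, derivation complete
--     if current == target:
--         derivation.append(current)
--         return derivation
--
--     # If current string is longer than target, backtrack
--     if len(current) > len(target):
--         return None
--
--     # Expand leftmost non-terminal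
--     for i, sym in enumerate(symbols):
--         if sym in grammar:
--             for production in grammar[sym]:
--                 new_symbols = symbols[:i] + list(production) + symbols[i+1:]
--                 result = leftmost_derivation(new_symbols, target, derivation + [current])
--                 if result:
--                     return result
--             return None  # No production worked
--     return None  # No non-terminal left and target not matched
-- ===== SOURCE B (Python) =====
-- grammar = {
--     "S": ["SS+", "SS*", "a"]
-- }
--
-- def leftmost_derivation(symbols, target, derivation):
--     """
--     Iterative DFS with an explicit stack instead of recursion (return value
--     only; unlike A, B never mutates the `derivation` argument in place).
--     """
--     stack = [(symbols, derivation)]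
--     while stack:
--         syms, deriv = stack.pop()
--         current = "".join(syms)
--         if current == target:
--             return deriv + [current]
--         if len(current) > len(target):
--             continue
--         i = next((j for j, s in enumerate(syms) if s in grammar), None)
--         if i is None:
--             continue
--         for production in reversed(grammar[syms[i]]):
--             stack.append((syms[:i] + list(production) + syms[i + 1:],
--                           deriv + [current]))
--     return None
-- ===== Notes on version B (the rewrite author's own statement) =====
-- stated objective: alternative
-- what changed: A's recursive backtracking (call per production, success propagated up the call stack) is replaced by an iterative DFS over an explicit worklist stack onto which pending alternatives are pushed in reverse order; equal return values, and B never mutates the derivation argument in place.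
import Mathlib
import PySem

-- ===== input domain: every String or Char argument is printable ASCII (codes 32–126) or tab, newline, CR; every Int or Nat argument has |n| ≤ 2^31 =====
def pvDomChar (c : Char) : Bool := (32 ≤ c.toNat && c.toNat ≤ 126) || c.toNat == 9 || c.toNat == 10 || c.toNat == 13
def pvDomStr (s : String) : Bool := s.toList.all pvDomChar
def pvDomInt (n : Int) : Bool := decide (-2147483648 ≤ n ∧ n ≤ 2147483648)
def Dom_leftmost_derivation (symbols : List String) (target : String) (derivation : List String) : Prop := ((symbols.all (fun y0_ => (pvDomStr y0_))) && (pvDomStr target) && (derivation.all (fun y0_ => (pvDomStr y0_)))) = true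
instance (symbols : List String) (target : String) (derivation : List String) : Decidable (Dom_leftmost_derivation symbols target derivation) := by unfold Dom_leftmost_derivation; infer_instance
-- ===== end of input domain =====

-- B replaces A's recursive backtracking by an explicit-stack iterative DFS over the
-- same search tree (return value only: A appends to `derivation` in place when the
-- initial string already equals the target; B never mutates its argument).
-- Both ports use a fuel parameter, a pure totality guard: the fuel is a termination
-- measure of the search and is proved sufficient (goA_irrel / goB_irrel below).

-- ===== shared helpers (both Pythons use the same module-level `grammar`) =====

-- "".join(symbols), at the List Char level (exact concatenation)
def joinChars (l : List String) : List Char := (l.map String.toList).flatten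

-- `sym in grammar` / `grammar[sym]` for grammar = {"S": ["SS+", "SS*", "a"]}
def prodsOf (sym : String) : List String := if sym == "S" then ["SS+", "SS*", "a"] else []

-- list(production): a string as the list of its one-character strings
def strChars (p : String) : List String := p.toList.map (fun c => String.mk [c])

-- A's `for i, sym in enumerate(symbols): if sym in grammar:` — the loop body runs only
-- for the FIRST grammar symbol; this helper returns (prefix, that symbol, suffix).
def splitFirstNT : List String → Option (List String × String × List String)
  | [] => none
  | s :: rest =>
      if s == "S" then some ([], s, rest)
      else (splitFirstNT rest).map (fun q => (s :: q.1, q.2.1, q.2.2))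

-- termination measure of the search, used as the (sufficient) fuel of both ports
def cntS (l : List String) : Nat := l.countP (fun s => s == "S")
def measureA (symbols : List String) (target : String) : Nat :=
  3 * (target.toList.length + 3 - (joinChars symbols).length) + cntS symbols
def stackW (stack : List (List String × List String)) (target : String) : Nat :=
  (stack.map (fun p => 4 ^ measureA p.1 target)).sum

-- ===== PORT A =====
def leftmost_derivationGo : Nat → List String → String → List String → Option (List String)
  | 0, _, _, _ => none          -- fuel exhausted (never reached: the fuel below is sufficient)
  | fuel + 1, symbols, target, derivation =>
    -- current = "".join(symbols)  (inlined as String.mk (joinChars symbols))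
    if String.mk (joinChars symbols) = target then some (derivation ++ [String.mk (joinChars symbols)])
    else if target.toList.length < (joinChars symbols).length then none
    else
      match splitFirstNT symbols with
      | none => none                                  -- no non-terminal left
      | some (pre, sym, suf) =>
          -- for production in grammar[sym]: … if result: return result; then None.
          -- (a successful result always ends in `current`, hence is a nonempty list,
          --  so Python's truthiness test equals `isSome` here)
          (prodsOf sym).findSome? (fun p =>
            leftmost_derivationGo fuel (pre ++ strChars p ++ suf) target
              (derivation ++ [String.mk (joinChars symbols)]))

def leftmost_derivation (symbols : List String) (target : String) (derivation : List String) : Option (List String) :=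
  leftmost_derivationGo (measureA symbols target + 1) symbols target derivation

-- ===== PORT B =====
-- the `while stack:` loop; the list head is the top of the Python stack
def loopBGo : Nat → List (List String × List String) → String → Option (List String)
  | _, [], _ => none            -- while loop ends: return None
  | 0, _ :: _, _ => none        -- fuel exhausted (never reached: the fuel below is sufficient)
  | fuel + 1, (syms, deriv) :: rest, target =>
    -- current = "".join(syms)  (inlined)
    if String.mk (joinChars syms) = target then some (deriv ++ [String.mk (joinChars syms)])
    else if target.toList.length < (joinChars syms).length then loopBGo fuel rest target
    else
      match splitFirstNT syms with                    -- next((j for j,s … if s in grammar), None)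
      | none => loopBGo fuel rest target
      | some (pre, sym, suf) =>
          -- for production in reversed(grammar[syms[i]]): stack.append(child)
          loopBGo fuel ((prodsOf sym).reverse.foldl
            (fun st prod =>
              (pre ++ strChars prod ++ suf, deriv ++ [String.mk (joinChars syms)]) :: st) rest) target

def leftmost_derivation_alt (symbols : List String) (target : String) (derivation : List String) : Option (List String) :=
  loopBGo (stackW [(symbols, derivation)] target + 1) [(symbols, derivation)] target

-- ===== PRECONDITION & SPEC =====
def Spec_leftmost_derivation (symbols : List String) (target : String) (derivation : List String) (out : Option (List String)) : Prop := out = leftmost_derivation_alt symbols target derivation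
instance (symbols : List String) (target : String) (derivation : List String) (out : Option (List String)) : Decidable (Spec_leftmost_derivation symbols target derivation out) := by unfold Spec_leftmost_derivation; infer_instance

-- ===== CLAIM (what is proved, stated in full; the proofs are below) =====
def Claim_equal_leftmost_derivation : Prop := ∀ (symbols : List String) (target : String) (derivation : List String), Dom_leftmost_derivation symbols target derivation → Spec_leftmost_derivation symbols target derivation (leftmost_derivation symbols target derivation)

-- ===== LEMMAS AND PROOFS =====

theorem joinChars_append (a b : List String) :
    joinChars (a ++ b) = joinChars a ++ joinChars b := by
  simp [joinChars]

theorem cntS_append (a b : List String) : cntS (a ++ b) = cntS a + cntS b := by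
  simp [cntS, List.countP_append]

theorem splitFirstNT_eq : ∀ (l pre suf : List String) (sym : String),
    splitFirstNT l = some (pre, sym, suf) → l = pre ++ "S" :: suf ∧ sym = "S" := by
  intro l
  induction l with
  | nil => intro pre suf sym h; simp [splitFirstNT] at h
  | cons s rest ih =>
      intro pre suf sym h
      unfold splitFirstNT at h
      by_cases hs : s == "S"
      · rw [if_pos hs] at h
        have hsS : s = "S" := by simpa using hs
        simp only [Option.some.injEq, Prod.mk.injEq] at h
        obtain ⟨h1, h2, h3⟩ := h
        subst h1; subst h3; subst h2
        simp [hsS]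
      · rw [if_neg hs] at h
        cases hsp : splitFirstNT rest with
        | none => rw [hsp] at h; simp at h
        | some q =>
            obtain ⟨p2, s2, r2⟩ := q
            rw [hsp] at h
            simp only [Option.map_some, Option.some.injEq, Prod.mk.injEq] at h
            obtain ⟨h1, h2, h3⟩ := h
            obtain ⟨hl, hy⟩ := ih p2 r2 s2 hsp
            subst h2; subst h1; subst h3
            constructor
            · rw [hl]; simp
            · exact hy

-- children of an expandable node are smaller
theorem measure_dec (pre suf : List String) (target : String) (prod : String)
    (hp : prod ∈ prodsOf "S")
    (hlen : (joinChars (pre ++ "S" :: suf)).length ≤ target.toList.length) :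
    measureA (pre ++ strChars prod ++ suf) target < measureA (pre ++ "S" :: suf) target := by
  have hS : pre ++ "S" :: suf = pre ++ ["S"] ++ suf := by simp
  rw [hS] at hlen ⊢
  have eS1 : (joinChars ["S"]).length = 1 := by decide
  have eS2 : cntS ["S"] = 1 := by decide
  simp only [prodsOf, beq_self_eq_true, if_pos, List.mem_cons,
    List.not_mem_nil, or_false] at hp
  rcases hp with rfl | rfl | rfl <;>
  · simp only [measureA, joinChars_append, cntS_append, List.length_append, eS1, eS2] at hlen ⊢
    have e1 : (joinChars (strChars "SS+")).length = 3 := by decide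
    have e2 : cntS (strChars "SS+") = 2 := by decide
    have e3 : (joinChars (strChars "SS*")).length = 3 := by decide
    have e4 : cntS (strChars "SS*") = 2 := by decide
    have e5 : (joinChars (strChars "a")).length = 1 := by decide
    have e6 : cntS (strChars "a") = 0 := by decide
    simp only [e1, e2, e3, e4, e5, e6]
    omega

-- A's result does not depend on the fuel, once the fuel exceeds the measure
theorem goA_irrel (target : String) : ∀ (f1 f2 : Nat) (syms deriv : List String),
    measureA syms target < f1 → measureA syms target < f2 →
    leftmost_derivationGo f1 syms target deriv = leftmost_derivationGo f2 syms target deriv := by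
  intro f1
  induction f1 with
  | zero => intro f2 syms deriv h1 h2; omega
  | succ g1 ih =>
    intro f2 syms deriv h1 h2
    obtain ⟨g2, rfl⟩ : ∃ g2, f2 = g2 + 1 := ⟨f2 - 1, by omega⟩
    rw [leftmost_derivationGo, leftmost_derivationGo]
    by_cases hq : String.mk (joinChars syms) = target
    · rw [if_pos hq, if_pos hq]
    · rw [if_neg hq, if_neg hq]
      by_cases hp : target.toList.length < (joinChars syms).length
      · rw [if_pos hp, if_pos hp]
      · rw [if_neg hp, if_neg hp]
        cases hsp : splitFirstNT syms with
        | none => rfl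
        | some t =>
          obtain ⟨pre, sym, suf⟩ := t
          obtain ⟨hl, hsym⟩ := splitFirstNT_eq syms pre suf sym hsp
          subst hsym
          have hd1 := measure_dec pre suf target "SS+" (by decide) (by rw [← hl]; omega)
          have hd2 := measure_dec pre suf target "SS*" (by decide) (by rw [← hl]; omega)
          have hd3 := measure_dec pre suf target "a" (by decide) (by rw [← hl]; omega)
          rw [← hl] at hd1 hd2 hd3
          simp only [prodsOf, beq_self_eq_true, if_pos, List.findSome?]
          rw [ih g2 _ _ (by omega) (by omega), ih g2 _ _ (by omega) (by omega),
            ih g2 _ _ (by omega) (by omega)]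

-- the pushed stack is lighter than the popped one
theorem stackW_expand (target : String) (pre suf deriv : List String)
    (rest : List (List String × List String))
    (hlen : (joinChars (pre ++ "S" :: suf)).length ≤ target.toList.length) :
    stackW (((prodsOf "S").reverse.foldl
        (fun st prod => (pre ++ strChars prod ++ suf, deriv) :: st) rest)) target
      < stackW ((pre ++ "S" :: suf, deriv) :: rest) target := by
  have h1 := measure_dec pre suf target "SS+" (by decide) hlen
  have h2 := measure_dec pre suf target "SS*" (by decide) hlen
  have h3 := measure_dec pre suf target "a" (by decide) hlen
  obtain ⟨k, hk⟩ : ∃ k, measureA (pre ++ "S" :: suf) target = k + 1 :=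
    ⟨measureA (pre ++ "S" :: suf) target - 1, by omega⟩
  have e1 : 4 ^ measureA (pre ++ strChars "SS+" ++ suf) target ≤ 4 ^ k :=
    Nat.pow_le_pow_right (by norm_num) (by omega)
  have e2 : 4 ^ measureA (pre ++ strChars "SS*" ++ suf) target ≤ 4 ^ k :=
    Nat.pow_le_pow_right (by norm_num) (by omega)
  have e3 : 4 ^ measureA (pre ++ strChars "a" ++ suf) target ≤ 4 ^ k :=
    Nat.pow_le_pow_right (by norm_num) (by omega)
  have e4 : 4 ^ measureA (pre ++ "S" :: suf) target = 4 * 4 ^ k := by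
    rw [hk, pow_succ]; ring
  have e5 : 1 ≤ 4 ^ k := Nat.one_le_pow _ _ (by norm_num)
  simp only [prodsOf, beq_self_eq_true, if_pos, List.reverse_cons, List.reverse_nil,
    List.nil_append, List.cons_append, List.foldl_cons, List.foldl_nil, stackW,
    List.map_cons, List.sum_cons]
  omega

-- B's result does not depend on the fuel, once the fuel exceeds the stack weight
theorem goB_irrel (target : String) : ∀ (f1 f2 : Nat) (stack : List (List String × List String)),
    stackW stack target < f1 → stackW stack target < f2 →
    loopBGo f1 stack target = loopBGo f2 stack target := by
  intro f1
  induction f1 with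
  | zero => intro f2 stack h1 h2; omega
  | succ g1 ih =>
    intro f2 stack h1 h2
    cases stack with
    | nil => cases f2 <;> rfl
    | cons top rest =>
      obtain ⟨syms, deriv⟩ := top
      obtain ⟨g2, rfl⟩ : ∃ g2, f2 = g2 + 1 := ⟨f2 - 1, by omega⟩
      have hpos : 1 ≤ 4 ^ measureA syms target := Nat.one_le_pow _ _ (by norm_num)
      have hW : stackW ((syms, deriv) :: rest) target
          = 4 ^ measureA syms target + stackW rest target := by
        simp [stackW]
      rw [loopBGo, loopBGo]
      by_cases hq : String.mk (joinChars syms) = target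
      · rw [if_pos hq, if_pos hq]
      · rw [if_neg hq, if_neg hq]
        by_cases hp : target.toList.length < (joinChars syms).length
        · rw [if_pos hp, if_pos hp]
          exact ih g2 rest (by omega) (by omega)
        · rw [if_neg hp, if_neg hp]
          cases hsp : splitFirstNT syms with
          | none => exact ih g2 rest (by omega) (by omega)
          | some t =>
            obtain ⟨pre, sym, suf⟩ := t
            obtain ⟨hl, hsym⟩ := splitFirstNT_eq syms pre suf sym hsp
            subst hsym
            have hx := stackW_expand target pre suf
              (deriv ++ [String.mk (joinChars syms)]) rest (by rw [← hl]; omega)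
            rw [← hl] at hx
            have hW' : stackW ((syms, deriv ++ [String.mk (joinChars syms)]) :: rest) target
                = 4 ^ measureA syms target + stackW rest target := by
              simp [stackW]
            exact ih g2 _ (by omega) (by omega)

-- processing the top of the stack = running A on it, then the rest of the stack
theorem loopB_cons (target : String) : ∀ (n : Nat) (syms : List String),
    measureA syms target ≤ n →
    ∀ (deriv : List String) (rest : List (List String × List String)) (f g : Nat),
    stackW ((syms, deriv) :: rest) target < f → stackW rest target < g →
    loopBGo f ((syms, deriv) :: rest) target =
      (match leftmost_derivation syms target deriv with
       | some r => some r
       | none => loopBGo g rest target) := by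
  intro n
  induction n using Nat.strong_induction_on with
  | _ n ih =>
    intro syms hm deriv rest f g hf hg
    have hpos : 1 ≤ 4 ^ measureA syms target := Nat.one_le_pow _ _ (by norm_num)
    have hW : stackW ((syms, deriv) :: rest) target
        = 4 ^ measureA syms target + stackW rest target := by
      simp [stackW]
    have hW' : stackW ((syms, deriv ++ [String.mk (joinChars syms)]) :: rest) target
        = 4 ^ measureA syms target + stackW rest target := by
      simp [stackW]
    obtain ⟨fl, rfl⟩ : ∃ fl, f = fl + 1 := ⟨f - 1, by omega⟩
    rw [loopBGo]
    rw [leftmost_derivation, leftmost_derivationGo]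
    by_cases h1 : String.mk (joinChars syms) = target
    · rw [if_pos h1, if_pos h1]
    · rw [if_neg h1, if_neg h1]
      by_cases h2 : target.toList.length < (joinChars syms).length
      · rw [if_pos h2, if_pos h2]
        exact goB_irrel target fl g rest (by omega) hg
      · rw [if_neg h2, if_neg h2]
        cases hsp : splitFirstNT syms with
        | none => exact goB_irrel target fl g rest (by omega) hg
        | some t =>
          obtain ⟨pre, sym, suf⟩ := t
          obtain ⟨hl, hsym⟩ := splitFirstNT_eq syms pre suf sym hsp
          subst hsym
          have hd1 := measure_dec pre suf target "SS+" (by decide) (by rw [← hl]; omega)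
          have hd2 := measure_dec pre suf target "SS*" (by decide) (by rw [← hl]; omega)
          have hd3 := measure_dec pre suf target "a" (by decide) (by rw [← hl]; omega)
          have hx := stackW_expand target pre suf
            (deriv ++ [String.mk (joinChars syms)]) rest (by rw [← hl]; omega)
          rw [← hl] at hd1 hd2 hd3 hx
          simp only [prodsOf, beq_self_eq_true, if_pos, List.reverse_cons, List.reverse_nil,
            List.nil_append, List.cons_append, List.foldl_cons, List.foldl_nil,
            List.findSome?] at hx ⊢
          have w123 : stackW ((pre ++ strChars "SS+" ++ suf, deriv ++ [String.mk (joinChars syms)]) ::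
              (pre ++ strChars "SS*" ++ suf, deriv ++ [String.mk (joinChars syms)]) ::
              (pre ++ strChars "a" ++ suf, deriv ++ [String.mk (joinChars syms)]) :: rest) target
              = 4 ^ measureA (pre ++ strChars "SS+" ++ suf) target
                + (4 ^ measureA (pre ++ strChars "SS*" ++ suf) target
                + (4 ^ measureA (pre ++ strChars "a" ++ suf) target + stackW rest target)) := by
            simp [stackW]
          have w23 : stackW ((pre ++ strChars "SS*" ++ suf, deriv ++ [String.mk (joinChars syms)]) ::
              (pre ++ strChars "a" ++ suf, deriv ++ [String.mk (joinChars syms)]) :: rest) target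
              = 4 ^ measureA (pre ++ strChars "SS*" ++ suf) target
                + (4 ^ measureA (pre ++ strChars "a" ++ suf) target + stackW rest target) := by
            simp [stackW]
          have w3 : stackW ((pre ++ strChars "a" ++ suf, deriv ++ [String.mk (joinChars syms)]) :: rest) target
              = 4 ^ measureA (pre ++ strChars "a" ++ suf) target + stackW rest target := by
            simp [stackW]
          have key : 4 ^ measureA syms target + stackW rest target ≤ fl := by
            rw [← hW]; omega
          have hx2 : stackW ((pre ++ strChars "SS+" ++ suf, deriv ++ [String.mk (joinChars syms)]) ::
              (pre ++ strChars "SS*" ++ suf, deriv ++ [String.mk (joinChars syms)]) ::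
              (pre ++ strChars "a" ++ suf, deriv ++ [String.mk (joinChars syms)]) :: rest) target
              < 4 ^ measureA syms target + stackW rest target := lt_of_lt_of_eq hx hW'
          have hfl123 : stackW ((pre ++ strChars "SS+" ++ suf, deriv ++ [String.mk (joinChars syms)]) ::
              (pre ++ strChars "SS*" ++ suf, deriv ++ [String.mk (joinChars syms)]) ::
              (pre ++ strChars "a" ++ suf, deriv ++ [String.mk (joinChars syms)]) :: rest) target < fl := by
            omega
          have p1 : 0 ≤ 4 ^ measureA (pre ++ strChars "SS+" ++ suf) target := Nat.zero_le _
          have hfl23 : stackW ((pre ++ strChars "SS*" ++ suf, deriv ++ [String.mk (joinChars syms)]) ::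
              (pre ++ strChars "a" ++ suf, deriv ++ [String.mk (joinChars syms)]) :: rest) target < fl := by
            omega
          have hfl3 : stackW ((pre ++ strChars "a" ++ suf, deriv ++ [String.mk (joinChars syms)]) :: rest) target < fl := by
            refine lt_of_le_of_lt ?_ hfl23
            rw [w3, w23]
            exact Nat.le_add_left _ _
          rw [ih (measureA (pre ++ strChars "SS+" ++ suf) target) (by omega) _ le_rfl _ _
            fl fl hfl123 hfl23]
          rw [leftmost_derivation]
          rw [goA_irrel target (measureA (pre ++ strChars "SS+" ++ suf) target + 1)
            (measureA syms target) _ _ (by omega) (by omega)]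
          cases hr1 : leftmost_derivationGo (measureA syms target)
              (pre ++ strChars "SS+" ++ suf) target (deriv ++ [String.mk (joinChars syms)]) with
          | some r => rfl
          | none =>
            simp only []
            rw [ih (measureA (pre ++ strChars "SS*" ++ suf) target) (by omega) _ le_rfl _ _
              fl fl hfl23 hfl3]
            rw [leftmost_derivation]
            rw [goA_irrel target (measureA (pre ++ strChars "SS*" ++ suf) target + 1)
              (measureA syms target) _ _ (by omega) (by omega)]
            cases hr2 : leftmost_derivationGo (measureA syms target)
                (pre ++ strChars "SS*" ++ suf) target (deriv ++ [String.mk (joinChars syms)]) with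
            | some r => rfl
            | none =>
              simp only []
              rw [ih (measureA (pre ++ strChars "a" ++ suf) target) (by omega) _ le_rfl _ _
                fl g hfl3 hg]
              rw [leftmost_derivation]
              rw [goA_irrel target (measureA (pre ++ strChars "a" ++ suf) target + 1)
                (measureA syms target) _ _ (by omega) (by omega)]
              cases leftmost_derivationGo (measureA syms target)
                  (pre ++ strChars "a" ++ suf) target (deriv ++ [String.mk (joinChars syms)]) <;> rfl

-- ===== VERDICT (by name: the statement is the Claim_ definition above) =====
theorem leftmost_derivation_spec : Claim_equal_leftmost_derivation := by
  intro symbols target derivation _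
  unfold Spec_leftmost_derivation leftmost_derivation_alt
  rw [loopB_cons target (measureA symbols target) symbols le_rfl derivation [] _ 1
    (by omega) (by simp [stackW])]
  cases h : leftmost_derivation symbols target derivation <;> rfl
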